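-- pv_equiv track=rewrite | github.com/deepakrawat72/problem_solving | algorithms/lists/count_triplets.py | count_triplets_using_set
-- ===== SOURCE A (Python) =====
-- from collections import Counter
--
-- def count_triplets_using_set(arr):
--     arr_len = len(arr)
--     triplet_count = 0
--
--     item_counts = Counter(arr)
--
--     for i in range(0, arr_len):
--         for j in range(i + 1, arr_len):
--             sum_of_nos = arr[i] + arr[j]
--             if sum_of_nos in item_counts:
--                 triplet_count += item_counts[sum_of_nos]
--
--     return triplet_count
-- ===== SOURCE B (Python) =====
-- from collections import Counter
--
-- def count_triplets_using_set(arr):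
--     # Aggregate by distinct values: O(U^2 + n) where U = number of distinct values,
--     # instead of looping over all index pairs.
--     c = Counter(arr)
--     items = list(c.items())
--     total = 0
--     for x, cx in items:
--         for y, cy in items:
--             total += cx * cy * c.get(x + y, 0)
--     diag = sum(cx * c.get(x + x, 0) for x, cx in items)
--     return (total - diag) // 2
-- ===== Notes on version B (the rewrite author's own statement) =====
-- stated objective: alternative
-- what changed: B replaces A's loop over all O(n^2) index pairs by aggregation over the Counter's distinct values: a double loop over Counter items weighted by multiplicities, minus the diagonal, halved; O(U^2 + n) in the number U of distinct values.
import Mathlib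
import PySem

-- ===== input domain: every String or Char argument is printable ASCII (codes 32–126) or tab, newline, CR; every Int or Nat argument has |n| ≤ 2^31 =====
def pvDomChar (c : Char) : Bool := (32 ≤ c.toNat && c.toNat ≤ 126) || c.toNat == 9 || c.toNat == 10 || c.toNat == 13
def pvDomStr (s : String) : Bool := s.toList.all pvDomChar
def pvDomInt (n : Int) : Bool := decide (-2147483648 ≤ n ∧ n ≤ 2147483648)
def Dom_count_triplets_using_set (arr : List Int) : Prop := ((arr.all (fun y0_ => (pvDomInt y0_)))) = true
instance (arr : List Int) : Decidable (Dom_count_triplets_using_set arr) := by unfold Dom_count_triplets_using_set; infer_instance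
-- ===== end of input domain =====

-- B aggregates over the Counter's distinct values (double loop over items weighted by
-- multiplicities, minus the diagonal, halved) instead of A's loop over all index pairs;
-- an alternative algorithm with the same return value.

-- ===== PORT A =====
def count_triplets_using_set (arr : List Int) : Int :=
  let arr_len : Int := arr.length
  let item_counts := PySem.Dict.counter arr
  (PySem.List.pyRange 0 arr_len 1).foldl (fun triplet_count i =>
    (PySem.List.pyRange (i + 1) arr_len 1).foldl (fun triplet_count j =>
      let sum_of_nos := PySem.List.pyGetD arr i 0 + PySem.List.pyGetD arr j 0
      if item_counts.contains sum_of_nos then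
        triplet_count + item_counts.getD sum_of_nos 0
      else triplet_count) triplet_count) 0

-- ===== PORT B =====
def count_triplets_using_set_alt (arr : List Int) : Int :=
  let c := PySem.Dict.counter arr
  let items := c.items
  let total := items.foldl (fun total p =>
    items.foldl (fun total q => total + p.2 * q.2 * c.getD (p.1 + q.1) 0) total) 0
  let diag := (items.map (fun p => p.2 * c.getD (p.1 + p.1) 0)).sum
  PySem.Int.floordiv (total - diag) 2

-- ===== PRECONDITION & SPEC =====
def Spec_count_triplets_using_set (arr : List Int) (out : Int) : Prop := out = count_triplets_using_set_alt arr
instance (arr : List Int) (out : Int) : Decidable (Spec_count_triplets_using_set arr out) := by unfold Spec_count_triplets_using_set; infer_instance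

-- ===== CLAIM (what is proved, stated in full; the proofs are below) =====
def Claim_equal_count_triplets_using_set : Prop := ∀ (arr : List Int), Dom_count_triplets_using_set arr → Spec_count_triplets_using_set arr (count_triplets_using_set arr)

-- ===== LEMMAS AND PROOFS =====

-- the multiplicity of s in arr, as an Int (what Counter(arr)[s] is when s occurs, 0 otherwise)
def cntI (arr : List Int) (s : Int) : Int := (arr.count s : Int)

-- sum of cntI over all pairs i < j, structurally on the list
def pairsW (g : Int → Int) : List Int → Int
  | [] => 0
  | x :: r => (r.map (fun y => g (x + y))).sum + pairsW g r

theorem ifcnt (arr : List Int) (s t : Int) :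
    (if (PySem.Dict.counter arr).contains s then t + (PySem.Dict.counter arr).getD s 0 else t)
      = t + cntI arr s := by
  by_cases h : s ∈ arr
  · simp [PySem.Dict.contains_counter, h, PySem.Dict.getD_counter, cntI]
  · simp [PySem.Dict.contains_counter, h, cntI, List.count_eq_zero_of_not_mem h]

theorem inner_fold (arr : List Int) (l : List Int) (x : Int) : ∀ t : Int,
    l.foldl (fun t y =>
        if (PySem.Dict.counter arr).contains (x + y) then
          t + (PySem.Dict.counter arr).getD (x + y) 0
        else t) t
      = t + (l.map (fun y => cntI arr (x + y))).sum := by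
  intro t
  have hfun : (fun (t y : Int) =>
      if (PySem.Dict.counter arr).contains (x + y) then
        t + (PySem.Dict.counter arr).getD (x + y) 0
      else t) = fun t y => t + cntI arr (x + y) := by
    funext t y; exact ifcnt arr (x + y) t
  rw [hfun, PySem.List.foldl_add]

theorem outer_fold (arr : List Int) : ∀ (m k : Nat) (t : Int), arr.length - k = m → k ≤ arr.length →
    (PySem.List.pyRange (k : Int) (arr.length : Int) 1).foldl (fun triplet_count i =>
      (PySem.List.pyRange (i + 1) (arr.length : Int) 1).foldl (fun triplet_count j =>
        let sum_of_nos := PySem.List.pyGetD arr i 0 + PySem.List.pyGetD arr j 0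
        if (PySem.Dict.counter arr).contains sum_of_nos then
          triplet_count + (PySem.Dict.counter arr).getD sum_of_nos 0
        else triplet_count) triplet_count) t
      = t + pairsW (cntI arr) (arr.drop k) := by
  intro m
  induction m with
  | zero =>
      intro k t hm hk
      have hk' : k = arr.length := by omega
      subst hk'
      simp [PySem.List.pyRange_one_eq_nil le_rfl, List.drop_length, pairsW]
  | succ m ih =>
      intro k t hm hk
      have hlt : k < arr.length := by omega
      rw [PySem.List.pyRange_one_cons (by exact_mod_cast hlt)]
      simp only [List.foldl_cons]
      have hdrop : arr.drop k = arr[k] :: arr.drop (k + 1) := by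
        rw [List.drop_eq_getElem_cons hlt]
      have hcast : ((k : Int) + 1) = ((k + 1 : Nat) : Int) := by push_cast; ring
      rw [hcast]
      have hstep :
          (PySem.List.pyRange ((k + 1 : Nat) : Int) (arr.length : Int) 1).foldl (fun triplet_count j =>
            let sum_of_nos := PySem.List.pyGetD arr ((k : Nat) : Int) 0 + PySem.List.pyGetD arr j 0
            if (PySem.Dict.counter arr).contains sum_of_nos then
              triplet_count + (PySem.Dict.counter arr).getD sum_of_nos 0
            else triplet_count) t
          = t + ((arr.drop (k + 1)).map (fun y => cntI arr (arr[k] + y))).sum := by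
        rw [PySem.List.foldl_pyRange_pyGetD' arr 0
              (fun acc y =>
                if (PySem.Dict.counter arr).contains (PySem.List.pyGetD arr ((k : Nat) : Int) 0 + y) then
                  acc + (PySem.Dict.counter arr).getD (PySem.List.pyGetD arr ((k : Nat) : Int) 0 + y) 0
                else acc) t (by positivity)]
        rw [Int.toNat_natCast]
        rw [inner_fold]
        have : PySem.List.pyGetD arr ((k : Nat) : Int) 0 = arr[k] := by
          rw [PySem.List.pyGetD_natCast]
          exact List.getD_eq_getElem arr 0 hlt
        rw [this]
      rw [hstep, ih (k + 1) _ (by omega) (by omega), hdrop]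
      simp [pairsW]
      ring

theorem A_eq_pairsW (arr : List Int) :
    count_triplets_using_set arr = pairsW (cntI arr) arr := by
  have h := outer_fold arr arr.length 0 0 (by omega) (by omega)
  simpa [count_triplets_using_set] using h

-- summing g over arr = summing (count x) * g x over the distinct values of arr
theorem sum_count_mul (xs : List Int) (f : Int → Int) :
    ((PySem.Set.ofList xs).map (fun x => (xs.count x : Int) * f x)).sum = (xs.map f).sum := by
  have hnd : (PySem.Set.ofList xs).Nodup := PySem.Set.nodup_ofList xs
  have hfin : (PySem.Set.ofList xs : List Int).toFinset = xs.toFinset := by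
    ext a; simp [PySem.Set.mem_ofList]
  rw [← List.sum_toFinset _ hnd, hfin, Finset.sum_list_map_count]
  apply Finset.sum_congr rfl
  intro m _
  simp

-- the full double sum decomposes as twice the i<j sum plus the diagonal
theorem square_sum (g : Int → Int) : ∀ l : List Int,
    (l.map (fun a => (l.map (fun b => g (a + b))).sum)).sum
      = 2 * pairsW g l + (l.map (fun a => g (a + a))).sum := by
  intro l
  induction l with
  | nil => simp [pairsW]
  | cons x r ih =>
      simp only [List.map_cons, List.sum_cons, pairsW]
      have hsplit : (r.map (fun a => (g (a + x) + (r.map (fun b => g (a + b))).sum))).sum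
          = (r.map (fun a => g (a + x))).sum + (r.map (fun a => (r.map (fun b => g (a + b))).sum)).sum := by
        rw [← List.sum_map_add]
      have hcomm : (r.map (fun a => g (a + x))).sum = (r.map (fun b => g (x + b))).sum := by
        simp [add_comm]
      rw [hsplit] at *
      rw [ih] at *
      rw [hcomm]
      ring

theorem alt_eq_pairsW (arr : List Int) :
    count_triplets_using_set_alt arr = pairsW (cntI arr) arr := by
  unfold count_triplets_using_set_alt
  simp only []
  have hinner : ∀ (p : Int × Int) (t : Int),
      ((PySem.Dict.counter arr).items).foldl
        (fun total q => total + p.2 * q.2 * (PySem.Dict.counter arr).getD (p.1 + q.1) 0) t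
      = t + (((PySem.Dict.counter arr).items).map
          (fun q => p.2 * q.2 * (PySem.Dict.counter arr).getD (p.1 + q.1) 0)).sum := by
    intro p t
    exact PySem.List.foldl_add _ _ _
  have hfun : (fun (total : Int) (p : Int × Int) =>
      ((PySem.Dict.counter arr).items).foldl
        (fun total q => total + p.2 * q.2 * (PySem.Dict.counter arr).getD (p.1 + q.1) 0) total)
      = fun total p => total + (((PySem.Dict.counter arr).items).map
          (fun q => p.2 * q.2 * (PySem.Dict.counter arr).getD (p.1 + q.1) 0)).sum := by
    funext t p; exact hinner p t
  rw [hfun, PySem.List.foldl_add]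
  -- rewrite items and counter lookups into counts over distinct values
  have htotal : (((PySem.Dict.counter arr).items).map (fun p =>
        (((PySem.Dict.counter arr).items).map
          (fun q => p.2 * q.2 * (PySem.Dict.counter arr).getD (p.1 + q.1) 0)).sum)).sum
      = (arr.map (fun a => (arr.map (fun b => cntI arr (a + b))).sum)).sum := by
    rw [PySem.Dict.items_counter]
    simp only [List.map_map, Function.comp_def, PySem.Dict.getD_counter]
    have hin : ∀ x : Int,
        ((PySem.Set.ofList arr : List Int).map
          (fun y => (arr.count x : Int) * (arr.count y : Int) * (arr.count (x + y) : Int))).sum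
        = (arr.count x : Int) * (arr.map (fun b => cntI arr (x + b))).sum := by
      intro x
      have : (fun y => (arr.count x : Int) * (arr.count y : Int) * (arr.count (x + y) : Int))
          = fun y => (arr.count x : Int) * ((arr.count y : Int) * cntI arr (x + y)) := by
        funext y; unfold cntI; ring
      rw [this, PySem.List.sum_map_const_mul_int, sum_count_mul arr (fun y => cntI arr (x + y))]
    simp only [hin]
    exact sum_count_mul arr _
  have hdiag : (((PySem.Dict.counter arr).items).map
        (fun p => p.2 * (PySem.Dict.counter arr).getD (p.1 + p.1) 0)).sum
      = (arr.map (fun a => cntI arr (a + a))).sum := by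
    rw [PySem.Dict.items_counter]
    simp only [List.map_map, Function.comp_def, PySem.Dict.getD_counter]
    exact sum_count_mul arr _
  rw [htotal, hdiag, square_sum (cntI arr) arr]
  have h2 : 0 + (2 * pairsW (cntI arr) arr + (arr.map (fun a => cntI arr (a + a))).sum)
      - (arr.map (fun a => cntI arr (a + a))).sum = 2 * pairsW (cntI arr) arr := by ring
  rw [h2, PySem.Int.floordiv_eq_ediv_of_pos (by norm_num)]
  omega

-- ===== VERDICT (by name: the statement is the Claim_ definition above) =====
theorem count_triplets_using_set_spec : Claim_equal_count_triplets_using_set := by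
  intro arr _
  unfold Spec_count_triplets_using_set
  rw [A_eq_pairsW, alt_eq_pairsW]
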